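-- pv_equiv track=rewrite | github.com/endre095/CSCI_1913_Assignments_And_Labs | nim.py | create_game_state
-- ===== SOURCE A (Python) =====
-- def create_game_state(size, token_max):
--     state = list()
--     if size == 0:
--         return state
--     for i in range(1,size+1,1):
--         if i <= token_max:
--             state.append(i)
--         else:
--             state.append(token_max)
--     return state
-- ===== SOURCE B (Python) =====
-- def create_game_state(size, token_max):
--     k = max(0, min(size, token_max))
--     return list(range(1, k + 1)) + [token_max] * (size - k)
-- ===== Notes on version B (the rewrite author's own statement) =====
-- stated objective: simpler
-- what changed: Replaces the per-element compare-and-append loop with two bulk-built segments: the rising prefix range(1, k+1) with k = max(0, min(size, token_max)), then (size-k) copies of token_max.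
import Mathlib
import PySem

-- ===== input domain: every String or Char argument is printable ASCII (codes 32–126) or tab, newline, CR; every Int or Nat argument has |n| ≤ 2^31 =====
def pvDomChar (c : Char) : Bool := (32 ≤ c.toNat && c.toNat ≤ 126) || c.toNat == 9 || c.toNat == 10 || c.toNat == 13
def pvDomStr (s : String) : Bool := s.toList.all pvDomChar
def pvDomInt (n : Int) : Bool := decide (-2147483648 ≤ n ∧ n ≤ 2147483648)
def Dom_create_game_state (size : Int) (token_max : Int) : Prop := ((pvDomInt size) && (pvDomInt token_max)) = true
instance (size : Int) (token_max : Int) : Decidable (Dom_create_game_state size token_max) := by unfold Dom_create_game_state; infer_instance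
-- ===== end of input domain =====

-- B builds the answer as two bulk segments (rising prefix, then repeated token_max) instead of A's
-- per-element compare-and-append loop; objective: simpler.

-- ===== PORT A =====
def create_game_state (size : Int) (token_max : Int) : List Int :=
  let state : List Int := []
  if size = 0 then state
  else
    (PySem.List.pyRange 1 (size + 1) 1).foldl
      (fun st i => if i ≤ token_max then st ++ [i] else st ++ [token_max]) state

-- ===== PORT B =====
def create_game_state_alt (size : Int) (token_max : Int) : List Int :=
  let k := max 0 (min size token_max)
  PySem.List.pyRange 1 (k + 1) 1 ++ List.replicate (size - k).toNat token_max

-- ===== PRECONDITION & SPEC =====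
def Spec_create_game_state (size : Int) (token_max : Int) (out : List Int) : Prop := out = create_game_state_alt size token_max
instance (size : Int) (token_max : Int) (out : List Int) : Decidable (Spec_create_game_state size token_max out) := by unfold Spec_create_game_state; infer_instance

-- ===== CLAIM (what is proved, stated in full; the proofs are below) =====
def Claim_equal_create_game_state : Prop := ∀ (size : Int) (token_max : Int), Dom_create_game_state size token_max → Spec_create_game_state size token_max (create_game_state size token_max)

-- ===== LEMMAS AND PROOFS =====

theorem cgs_key (tm : Int) : ∀ (n : Nat),
    (PySem.List.pyRange 1 ((n : Int) + 1) 1).foldl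
      (fun st i => if i ≤ tm then st ++ [i] else st ++ [tm]) []
    = PySem.List.pyRange 1 (max 0 (min (n : Int) tm) + 1) 1
        ++ List.replicate ((n : Int) - max 0 (min (n : Int) tm)).toNat tm := by
  intro n
  induction n with
  | zero =>
    have h3 : PySem.List.pyRange 1 ((0:Nat):Int) 1 = [] :=
      PySem.List.pyRange_one_eq_nil (by omega)
    have hk : max 0 (min ((0:Nat):Int) tm) = 0 := by push_cast; omega
    rw [hk]
    simp [PySem.List.pyRange_one_eq_nil]
  | succ n ih =>
    have hsplit : PySem.List.pyRange 1 ((n : Int) + 1 + 1) 1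
        = PySem.List.pyRange 1 ((n : Int) + 1) 1 ++ [(n : Int) + 1] := by
      have := PySem.List.pyRange_one_succ_right (a := 1) (b := (n : Int) + 1) (by omega)
      simpa using this
    have hfold : (PySem.List.pyRange 1 ((n : Int) + 1 + 1) 1).foldl
        (fun st i => if i ≤ tm then st ++ [i] else st ++ [tm]) []
        = (if (n : Int) + 1 ≤ tm then
            (PySem.List.pyRange 1 ((n : Int) + 1) 1).foldl
              (fun st i => if i ≤ tm then st ++ [i] else st ++ [tm]) [] ++ [(n : Int) + 1]
          else
            (PySem.List.pyRange 1 ((n : Int) + 1) 1).foldl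
              (fun st i => if i ≤ tm then st ++ [i] else st ++ [tm]) [] ++ [tm]) := by
      rw [hsplit, List.foldl_append]
      simp [List.foldl]
    by_cases h : (n : Int) + 1 ≤ tm
    · have hk : max 0 (min ((n : Int)) tm) = (n : Int) := by omega
      have hk' : max 0 (min ((n : Int) + 1) tm) = (n : Int) + 1 := by omega
      have hcast : ((n + 1 : Nat) : Int) = (n : Int) + 1 := by push_cast; ring
      rw [hcast, hfold, if_pos h, ih, hk, hk']
      have hr : PySem.List.pyRange 1 ((n : Int) + 1 + 1) 1
          = PySem.List.pyRange 1 ((n : Int) + 1) 1 ++ [(n : Int) + 1] := hsplit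
      simp [hr]
    · have hk : max 0 (min ((n : Int)) tm) = max 0 tm := by omega
      have hk' : max 0 (min ((n : Int) + 1) tm) = max 0 tm := by omega
      have hcast : ((n + 1 : Nat) : Int) = (n : Int) + 1 := by push_cast; ring
      rw [hcast, hfold, if_neg h, ih, hk, hk']
      have hcnt : ((n : Int) + 1 - max 0 tm).toNat = ((n : Int) - max 0 tm).toNat + 1 := by
        omega
      rw [hcnt, List.replicate_succ']
      simp

-- ===== VERDICT (by name: the statement is the Claim_ definition above) =====
theorem create_game_state_spec : Claim_equal_create_game_state := by
  intro size tm _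
  unfold Spec_create_game_state create_game_state create_game_state_alt
  by_cases hz : size = 0
  · subst hz
    have hk : max 0 (min (0 : Int) tm) = 0 := by omega
    rw [if_pos rfl, hk]
    simp [PySem.List.pyRange_one_eq_nil]
  · simp only [if_neg hz]
    by_cases hneg : size < 0
    · have hk : max 0 (min size tm) = 0 := by omega
      have h1 : PySem.List.pyRange 1 (size + 1) 1 = [] :=
        PySem.List.pyRange_one_eq_nil (by omega)
      have h3 : PySem.List.pyRange 1 ((0:Int) + 1) 1 = [] :=
        PySem.List.pyRange_one_eq_nil (by omega)
      have h2 : (size - (0:Int)).toNat = 0 := by omega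
      rw [h1, hk, h3, h2]
      simp
    · have hpos : 0 < size := by omega
      obtain ⟨n, hn⟩ : ∃ n : Nat, size = (n : Int) := ⟨size.toNat, by omega⟩
      subst hn
      exact cgs_key tm n
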